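-- pv_equiv track=rewrite | github.com/afonsoazaruja/IST-proj-fp-1 | projeto.py | obter_pin
-- ===== SOURCE A (Python) =====
-- def obter_posicao(c, p):  # 2.2.1
--     """ obter_posicao : str, int --> int
--     Esta função recebe uma cadeia de carateres contendo apenas um caráter que representa
--     a direção de um único movimento ('C', 'B', 'E', 'D') e um inteiro representando a
--     posição atual (1, 2, 3, 4, 5, 6, 7, 8 ou 9), e devolve o inteiro que corresponde á
--     nova posição.
--     """
--     if c == 'C' and p != 1 and p != 2 and p != 3:
--         p -= 3
--     if c == 'B' and p != 7 and p != 8 and p != 9: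
--         p += 3
--     if c == 'D' and p != 3 and p != 6 and p != 9:
--         p += 1
--     if c == 'E' and p != 1 and p != 4 and p != 7:
--         p -= 1
--     return p
--
-- def obter_digito(cad_car, pos):  # 2.2.2
--     """ obter_digito : str, int --> int
--     Esta função recebe uma cadeia de carateres contendo uma sequência de um ou mais
--     movimentos e um inteiro representando a posição inicial. Devolvendo o inteiro que
--     corresponde ao dígito a marcar após finalizar todos os movimentos.
--     """
--     ult_pos = obter_posicao(cad_car[0], pos)
--     i = 1
--     while i < len(cad_car):
--         ult_pos = obter_posicao(cad_car[i], ult_pos)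
--         i += 1
--     return ult_pos
--
-- def obter_pin(t):  # 2.2.3
--     """ obter_pin : tuple --> tuple
--     Esta função recebe um tuplo contendo entre 4 a 10 sequências de movimentos e devolve
--     o tuplo de inteiro que contêm o pin codificado de acordo com o tuplo de movimentos.
--     """
--     lst = ['C', 'D', 'E', 'B']
--     if not isinstance(t, tuple) or not 4 <= len(t) <= 10 or '' in t:
--         raise ValueError('obter_pin: argumento invalido')
--     for j in t:
--         if not isinstance(j, str) or ' ' in j:
--             raise ValueError('obter_pin: argumento invalido')
--         for k in j:
--             if k not in lst:
--                 raise ValueError('obter_pin: argumento invalido')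
--     else:
--         pin, ult_pos, i = (), 5, 0
--         while i < len(t):
--             ult_pos = obter_digito(t[i], ult_pos)  # recebe a ultima posicao
--             pin += (ult_pos,)  # insere a posicao num tuplo
--             i += 1
--     return pin
-- ===== SOURCE B (Python) =====
-- def _trajectory(moves, dec, inc):
--     # full trajectory of one clamped axis (0..2) over the flattened move string
--     xs = [1]
--     for ch in moves:
--         x = xs[-1]
--         if ch == dec and x > 0:
--             x -= 1
--         elif ch == inc and x < 2:
--             x += 1
--         xs.append(x)
--     return xs
--
-- def obter_pin(t):
--     if not isinstance(t, tuple) or not 4 <= len(t) <= 10 or '' in t: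
--         raise ValueError('obter_pin: argumento invalido')
--     for s in t:
--         if not isinstance(s, str) or ' ' in s:
--             raise ValueError('obter_pin: argumento invalido')
--         for k in s:
--             if k not in 'CDEB':
--                 raise ValueError('obter_pin: argumento invalido')
--     moves = ''.join(t)
--     rows = _trajectory(moves, 'C', 'B')  # vertical axis: only C/B matter
--     cols = _trajectory(moves, 'E', 'D')  # horizontal axis: only E/D matter
--     ends = []
--     n = 0
--     for s in t:
--         n += len(s)
--         ends.append(n)
--     return tuple(3 * rows[i] + cols[i] + 1 for i in ends)
-- ===== Notes on version B (the rewrite author's own statement) =====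
-- stated objective: alternative
-- what changed: B flattens all sequences into one move string, computes the full row and column trajectories as two independent clamped scans over separate axes (only C/B affect rows, only E/D affect columns), and then gathers the PIN digits by indexing the trajectories at the cumulative sequence boundaries, instead of A's nested per-sequence simulation threading a single digit 1..9 through edge-case conditionals.
import Mathlib
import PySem

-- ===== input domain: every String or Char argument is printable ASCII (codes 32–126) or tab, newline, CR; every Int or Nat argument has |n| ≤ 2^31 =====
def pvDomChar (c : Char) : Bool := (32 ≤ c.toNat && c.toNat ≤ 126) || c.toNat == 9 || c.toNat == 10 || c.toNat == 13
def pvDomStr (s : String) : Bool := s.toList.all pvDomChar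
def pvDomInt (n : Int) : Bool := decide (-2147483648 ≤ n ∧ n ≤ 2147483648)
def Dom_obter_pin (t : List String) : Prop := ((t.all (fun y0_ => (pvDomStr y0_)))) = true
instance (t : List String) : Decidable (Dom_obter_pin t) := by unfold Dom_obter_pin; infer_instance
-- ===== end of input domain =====

-- B replaces A's nested per-sequence digit simulation by two independent clamped axis
-- trajectories over the flattened move string, gathered at sequence boundaries; equal values, same cost.

-- ===== PORT A =====
def obter_posicao (c : Char) (p : Int) : Int :=
  let p := if c = 'C' ∧ p ≠ 1 ∧ p ≠ 2 ∧ p ≠ 3 then p - 3 else p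
  let p := if c = 'B' ∧ p ≠ 7 ∧ p ≠ 8 ∧ p ≠ 9 then p + 3 else p
  let p := if c = 'D' ∧ p ≠ 3 ∧ p ≠ 6 ∧ p ≠ 9 then p + 1 else p
  let p := if c = 'E' ∧ p ≠ 1 ∧ p ≠ 4 ∧ p ≠ 7 then p - 1 else p
  p

-- cad_car[0] raises IndexError on the empty string; Pre_ excludes empty sequences, so the [] branch is never reached
def obter_digito (cad_car : String) (pos : Int) : Int :=
  match cad_car.toList with
  | [] => pos
  | c :: rest => rest.foldl (fun p ch => obter_posicao ch p) (obter_posicao c pos)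

-- the Python validation raises ValueError on invalid tuples; those inputs are excluded by Pre_obter_pin
def obter_pin (t : List String) : List Int :=
  (t.foldl (fun (acc : List Int × Int) s =>
      let up := obter_digito s acc.2
      (acc.1 ++ [up], up)) ([], 5)).1

-- ===== PORT B =====
-- _trajectory's append-to-list loop is the scan of this step over the moves, from 1
def pvStep (dec inc : Char) (x : Int) (ch : Char) : Int :=
  if ch = dec ∧ 0 < x then x - 1 else if ch = inc ∧ x < 2 then x + 1 else x

def pvTrajectory (moves : List Char) (dec inc : Char) : List Int :=
  List.scanl (pvStep dec inc) 1 moves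

-- B's validation raises the same ValueError cases; excluded by Pre_obter_pin.
-- rows[i]/cols[i]: the boundary indices are always in range, so Python's IndexError never fires; getD 0 is a never-used default
def obter_pin_alt (t : List String) : List Int :=
  let moves := (t.map String.toList).flatten
  let rows := pvTrajectory moves 'C' 'B'
  let cols := pvTrajectory moves 'E' 'D'
  let ends := (t.foldl (fun (acc : List Nat × Nat) s =>
      (acc.1 ++ [acc.2 + s.toList.length], acc.2 + s.toList.length)) ([], 0)).1
  ends.map (fun i => 3 * rows.getD i 0 + cols.getD i 0 + 1)

-- ===== PRECONDITION & SPEC =====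
-- Pre_: exactly the inputs A's validation accepts: 4..10 sequences, each nonempty and made only of 'C','D','E','B'
-- (so the ' ' check and the char check coincide; outside Pre_ both programs raise ValueError).
def Pre_obter_pin (t : List String) : Prop :=
  4 ≤ t.length ∧ t.length ≤ 10 ∧
  t.all (fun s => !(s == "") && s.toList.all (fun ch => ch == 'C' || ch == 'D' || ch == 'E' || ch == 'B')) = true
instance (t : List String) : Decidable (Pre_obter_pin t) := by unfold Pre_obter_pin; infer_instance
def pvWitness_obter_pin : List String := ["C", "D", "B", "E"]

def Spec_obter_pin (t : List String) (out : List Int) : Prop := out = obter_pin_alt t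
instance (t : List String) (out : List Int) : Decidable (Spec_obter_pin t out) := by unfold Spec_obter_pin; infer_instance

-- ===== CLAIM (what is proved, stated in full; the proofs are below) =====
def Claim_equal_obter_pin : Prop := ∀ (t : List String), Dom_obter_pin t → Pre_obter_pin t → Spec_obter_pin t (obter_pin t)

-- ===== LEMMAS AND PROOFS =====

-- A's digit stream, abstracted from its fold
def pvAdigits : List (List Char) → Int → List Int
  | [], _ => []
  | l :: rest, p =>
      let q := l.foldl (fun x ch => obter_posicao ch x) p
      q :: pvAdigits rest q

-- B's boundary indices, abstracted from its fold
def pvEndsFrom : List (List Char) → Nat → List Nat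
  | [], _ => []
  | l :: rest, n => (n + l.length) :: pvEndsFrom rest (n + l.length)

theorem pvObter_digito_eq (s : String) (p : Int) :
    obter_digito s p = s.toList.foldl (fun q ch => obter_posicao ch q) p := by
  unfold obter_digito
  cases s.toList with
  | nil => rfl
  | cons c rest => simp [List.foldl_cons]

theorem pvAloop_eq (t : List String) (pin : List Int) (p : Int) :
    (t.foldl (fun (acc : List Int × Int) s =>
        let up := obter_digito s acc.2
        (acc.1 ++ [up], up)) (pin, p)).1 = pin ++ pvAdigits (t.map String.toList) p := by
  induction t generalizing pin p with
  | nil => simp [pvAdigits]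
  | cons s rest ih =>
    rw [List.foldl_cons, ih]
    simp [pvAdigits, pvObter_digito_eq]

theorem pvEndsLoop_eq (t : List String) (acc : List Nat) (n : Nat) :
    (t.foldl (fun (a : List Nat × Nat) s =>
        (a.1 ++ [a.2 + s.toList.length], a.2 + s.toList.length)) (acc, n)).1
      = acc ++ pvEndsFrom (t.map String.toList) n := by
  induction t generalizing acc n with
  | nil => simp [pvEndsFrom]
  | cons s rest ih =>
    simp only [List.foldl_cons, List.map_cons, pvEndsFrom]
    rw [ih]
    simp

theorem pvEndsFrom_shift (ts : List (List Char)) (n : Nat) :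
    pvEndsFrom ts n = (pvEndsFrom ts 0).map (n + ·) := by
  induction ts generalizing n with
  | nil => rfl
  | cons l rest ih =>
    simp only [pvEndsFrom, List.map_cons, Nat.zero_add]
    rw [ih (n + l.length), ih l.length, List.map_map]
    rw [List.cons_eq_cons]
    exact ⟨rfl, List.map_congr_left fun x _ => by simp [Nat.add_assoc]⟩

theorem pvScanl_append {α β : Type} (f : β → α → β) (b : β) (u v : List α) :
    List.scanl f b (u ++ v) = (List.scanl f b u).dropLast ++ List.scanl f (u.foldl f b) v := by
  induction u generalizing b with
  | nil => simp
  | cons x u ih =>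
    have hne : List.scanl f (f b x) u ≠ [] := by
      intro h
      have := congrArg List.length h
      simp [List.length_scanl] at this
    simp only [List.cons_append, List.scanl_cons, List.foldl_cons]
    rw [ih, List.dropLast_cons_of_ne_nil hne, List.cons_append]

theorem pvScanl_getD_zero {α β : Type} (f : β → α → β) (b : β) (l : List α) (d : β) :
    (List.scanl f b l).getD 0 d = b := by
  cases l <;> simp [List.scanl]

-- one move: A's digit step decomposes into the two independent clamped axis steps
theorem pvStep_char (ch : Char) (hch : ch = 'C' ∨ ch = 'D' ∨ ch = 'E' ∨ ch = 'B')
    (r c : Int) (hr1 : 0 ≤ r) (hr2 : r ≤ 2) (hc1 : 0 ≤ c) (hc2 : c ≤ 2) :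
    obter_posicao ch (3 * r + c + 1) = 3 * pvStep 'C' 'B' r ch + pvStep 'E' 'D' c ch + 1 ∧
    0 ≤ pvStep 'C' 'B' r ch ∧ pvStep 'C' 'B' r ch ≤ 2 ∧
    0 ≤ pvStep 'E' 'D' c ch ∧ pvStep 'E' 'D' c ch ≤ 2 := by
  interval_cases r <;> interval_cases c <;> rcases hch with h | h | h | h <;> subst h <;> decide

-- a whole move list: A's fold decomposes into the two axis folds
theorem pvSeq_eq (l : List Char) (hl : ∀ ch ∈ l, ch = 'C' ∨ ch = 'D' ∨ ch = 'E' ∨ ch = 'B')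
    (r c : Int) (hr1 : 0 ≤ r) (hr2 : r ≤ 2) (hc1 : 0 ≤ c) (hc2 : c ≤ 2) :
    l.foldl (fun x ch => obter_posicao ch x) (3 * r + c + 1)
      = 3 * l.foldl (pvStep 'C' 'B') r + l.foldl (pvStep 'E' 'D') c + 1 ∧
    0 ≤ l.foldl (pvStep 'C' 'B') r ∧ l.foldl (pvStep 'C' 'B') r ≤ 2 ∧
    0 ≤ l.foldl (pvStep 'E' 'D') c ∧ l.foldl (pvStep 'E' 'D') c ≤ 2 := by
  induction l generalizing r c with
  | nil => exact ⟨rfl, hr1, hr2, hc1, hc2⟩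
  | cons ch rest ih =>
    obtain ⟨he, h1, h2, h3, h4⟩ := pvStep_char ch (hl ch (List.mem_cons_self ..)) r c hr1 hr2 hc1 hc2
    simpa [List.foldl_cons, he] using
      ih (fun x hm => hl x (List.mem_cons_of_mem _ hm)) _ _ h1 h2 h3 h4

-- main correspondence: gathering the axis trajectories at the boundaries yields A's digit stream
theorem pvMain (ts : List (List Char))
    (hv : ∀ l ∈ ts, ∀ ch ∈ l, ch = 'C' ∨ ch = 'D' ∨ ch = 'E' ∨ ch = 'B')
    (r c : Int) (hr1 : 0 ≤ r) (hr2 : r ≤ 2) (hc1 : 0 ≤ c) (hc2 : c ≤ 2) :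
    (pvEndsFrom ts 0).map (fun i =>
        3 * (List.scanl (pvStep 'C' 'B') r ts.flatten).getD i 0
          + (List.scanl (pvStep 'E' 'D') c ts.flatten).getD i 0 + 1)
      = pvAdigits ts (3 * r + c + 1) := by
  induction ts generalizing r c with
  | nil => rfl
  | cons l rest ih =>
    obtain ⟨he, h1, h2, h3, h4⟩ :=
      pvSeq_eq l (hv l (List.mem_cons_self ..)) r c hr1 hr2 hc1 hc2
    have hrest : ∀ x ∈ rest, ∀ ch ∈ x, ch = 'C' ∨ ch = 'D' ∨ ch = 'E' ∨ ch = 'B' :=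
      fun x hm => hv x (List.mem_cons_of_mem _ hm)
    have hlenR : ((List.scanl (pvStep 'C' 'B') r l).dropLast).length = l.length := by
      simp [List.length_scanl]
    have hlenC : ((List.scanl (pvStep 'E' 'D') c l).dropLast).length = l.length := by
      simp [List.length_scanl]
    simp only [pvEndsFrom, Nat.zero_add, List.flatten_cons, List.map_cons,
      pvScanl_append, pvAdigits]
    rw [List.cons_eq_cons]
    constructor
    · -- head digit: index l.length lands at the start of the second scan
      have hA := List.getD_append_right ((List.scanl (pvStep 'C' 'B') r l).dropLast)
        (List.scanl (pvStep 'C' 'B') (List.foldl (pvStep 'C' 'B') r l) rest.flatten) 0 l.length (by omega)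
      have hC := List.getD_append_right ((List.scanl (pvStep 'E' 'D') c l).dropLast)
        (List.scanl (pvStep 'E' 'D') (List.foldl (pvStep 'E' 'D') c l) rest.flatten) 0 l.length (by omega)
      rw [hA, hC]
      simp only [hlenR, hlenC, Nat.sub_self, pvScanl_getD_zero]
      omega
    · -- tail: shift the boundaries and apply the induction hypothesis
      rw [pvEndsFrom_shift rest l.length, List.map_map]
      rw [he, ← ih hrest _ _ h1 h2 h3 h4]
      apply List.map_congr_left
      intro i _
      have hA := List.getD_append_right ((List.scanl (pvStep 'C' 'B') r l).dropLast)
        (List.scanl (pvStep 'C' 'B') (List.foldl (pvStep 'C' 'B') r l) rest.flatten) 0 (l.length + i) (by omega)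
      have hC := List.getD_append_right ((List.scanl (pvStep 'E' 'D') c l).dropLast)
        (List.scanl (pvStep 'E' 'D') (List.foldl (pvStep 'E' 'D') c l) rest.flatten) 0 (l.length + i) (by omega)
      simp only [Function.comp_apply, hA, hC, hlenR, hlenC, Nat.add_sub_cancel_left]

-- ===== VERDICT (by name: the statement is the Claim_ definition above) =====
theorem obter_pin_spec : Claim_equal_obter_pin := by
  intro t _ hpre
  obtain ⟨_, _, hall⟩ := hpre
  have hv : ∀ l ∈ t.map String.toList, ∀ ch ∈ l, ch = 'C' ∨ ch = 'D' ∨ ch = 'E' ∨ ch = 'B' := by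
    intro l hl ch hch
    obtain ⟨s, hs, rfl⟩ := List.mem_map.mp hl
    have := List.all_eq_true.mp hall s hs
    simp only [Bool.and_eq_true, List.all_eq_true, Bool.or_eq_true, beq_iff_eq] at this
    have := this.2 ch hch
    tauto
  show obter_pin t = obter_pin_alt t
  unfold obter_pin obter_pin_alt pvTrajectory
  rw [pvAloop_eq, pvEndsLoop_eq]
  simp only [List.nil_append]
  have h5 : (5 : Int) = 3 * 1 + 1 + 1 := by norm_num
  rw [h5, ← pvMain (t.map String.toList) hv 1 1 (by norm_num) (by norm_num) (by norm_num) (by norm_num)]
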